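-- pv_equiv track=rewrite | github.com/tuprikov/toloka_test | main.py | generate_full_distributions
-- ===== SOURCE A (Python) =====
-- from copy import deepcopy
--
-- def generate_full_distributions(
--     difficulty: list[int],
--     core_distributions: dict[tuple[int, int, int], tuple[int, int, int]]
-- ) -> list[dict[int, list[int]]]:
--     full_distributions = []
--     for core_i, core_distr in core_distributions.items():
--         new_distributions = [{p: [distr_value] for p, distr_value in enumerate(core_distr)}]
--         for i, elem in enumerate(difficulty):
--             if i not in core_i:
--                 temp_distributions = []
--                 for s in range(3):
--                     for distribution in new_distributions:
--                         new_distribution = deepcopy(distribution)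
--                         new_distribution[s].append(elem)
--                         temp_distributions.append(new_distribution)
--                 new_distributions = temp_distributions
--         full_distributions.extend(new_distributions)
--
--     return full_distributions
-- ===== SOURCE B (Python) =====
-- from itertools import product
--
-- def generate_full_distributions(
--     difficulty: list[int],
--     core_distributions: dict[tuple[int, int, int], tuple[int, int, int]]
-- ) -> list[dict[int, list[int]]]:
--     result = []
--     for core_i, core_distr in core_distributions.items():
--         extras = [elem for i, elem in enumerate(difficulty) if i not in core_i]
--         for choice in product(range(3), repeat=len(extras)):
--             dist = {p: [v] for p, v in enumerate(core_distr)}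
--             # reversed(choice): the first extra element's bucket varies fastest
--             for bucket, elem in zip(reversed(choice), extras):
--                 dist[bucket].append(elem)
--             result.append(dist)
--     return result
-- ===== Notes on version B (the rewrite author's own statement) =====
-- stated objective: simpler
-- what changed: Instead of A's breadth-first rebuild that deep-copies every partial distribution once per extra element, B enumerates the 3^m bucket assignments directly with itertools.product and builds each output dict exactly once (product coordinates reversed to match A's ordering).
import Mathlib
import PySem

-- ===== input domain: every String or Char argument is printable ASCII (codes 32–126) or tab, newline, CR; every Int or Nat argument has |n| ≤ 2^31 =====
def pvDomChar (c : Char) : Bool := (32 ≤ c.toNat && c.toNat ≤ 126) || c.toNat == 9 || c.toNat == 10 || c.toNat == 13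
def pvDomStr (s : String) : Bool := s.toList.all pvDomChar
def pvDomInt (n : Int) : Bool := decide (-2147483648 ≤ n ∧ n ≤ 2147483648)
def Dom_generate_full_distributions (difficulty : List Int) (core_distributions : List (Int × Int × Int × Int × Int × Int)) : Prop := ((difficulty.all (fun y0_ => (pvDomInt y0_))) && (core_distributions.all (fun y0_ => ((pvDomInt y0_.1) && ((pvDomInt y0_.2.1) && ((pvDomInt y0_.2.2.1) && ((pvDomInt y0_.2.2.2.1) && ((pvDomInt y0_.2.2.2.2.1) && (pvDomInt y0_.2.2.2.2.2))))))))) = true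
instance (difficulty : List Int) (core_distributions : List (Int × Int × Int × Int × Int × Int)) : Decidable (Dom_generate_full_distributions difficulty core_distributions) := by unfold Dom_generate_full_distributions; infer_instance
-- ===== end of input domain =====

-- B replaces A's exponential rebuild-and-deepcopy inner loop by direct enumeration of the
-- 3^m bucket assignments (itertools.product), building each output dict once; objective: simpler.

-- ===== PORT A =====
-- `new_distribution[s].append(elem)`: the dict's keys 0,1,2 are distinct, so updating the
-- (unique) entry with key s by mapping over the association list is exact Python dict semantics.
def pvBucketAppendA (s : Int) (elem : Int) (d : List (Int × List Int)) : List (Int × List Int) :=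
  d.map (fun kv => if kv.1 == s then (kv.1, kv.2 ++ [elem]) else kv)

def generate_full_distributions (difficulty : List Int) (core_distributions : List (Int × Int × Int × Int × Int × Int)) : List (List (Int × List Int)) :=
  core_distributions.foldl (fun full_distributions cd =>
    -- {p: [distr_value] for p, distr_value in enumerate(core_distr)} with core_distr a 3-tuple
    let init : List (Int × List Int) := [(0, [cd.2.2.2.1]), (1, [cd.2.2.2.2.1]), (2, [cd.2.2.2.2.2])]
    let new_distributions :=
      (PySem.List.enumerate difficulty).foldl (fun nds ie =>
        if !(ie.1 == cd.1 || ie.1 == cd.2.1 || ie.1 == cd.2.2.1) then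
          -- for s in range(3): for distribution in nds: temp.append(deepcopy+append)
          ([0, 1, 2] : List Int).foldl (fun temp s => temp ++ nds.map (pvBucketAppendA s ie.2)) []
        else nds) [init]
    full_distributions ++ new_distributions) []

-- ===== PORT B =====
-- itertools.product(range(3), repeat=m), first coordinate outermost (slowest varying)
def pvProduct3 : Nat → List (List Int)
  | 0 => [[]]
  | n + 1 => ([0, 1, 2] : List Int).flatMap (fun d => (pvProduct3 n).map (fun t => d :: t))

-- dist[bucket].append(elem); keys 0,1,2 distinct, map over the assoc list is exact
def pvBucketAppendB (s : Int) (elem : Int) (d : List (Int × List Int)) : List (Int × List Int) :=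
  d.map (fun kv => if kv.1 == s then (kv.1, kv.2 ++ [elem]) else kv)

def generate_full_distributions_alt (difficulty : List Int) (core_distributions : List (Int × Int × Int × Int × Int × Int)) : List (List (Int × List Int)) :=
  core_distributions.flatMap (fun cd =>
    let extras :=
      ((PySem.List.enumerate difficulty).filter
        (fun ie => !(ie.1 == cd.1 || ie.1 == cd.2.1 || ie.1 == cd.2.2.1))).map (·.2)
    (pvProduct3 extras.length).map (fun choice =>
      -- zip(reversed(choice), extras): first extra's bucket varies fastest
      (choice.reverse.zip extras).foldl
        (fun dist be => pvBucketAppendB be.1 be.2 dist)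
        [(0, [cd.2.2.2.1]), (1, [cd.2.2.2.2.1]), (2, [cd.2.2.2.2.2])]))

-- ===== PRECONDITION & SPEC =====
def Spec_generate_full_distributions (difficulty : List Int) (core_distributions : List (Int × Int × Int × Int × Int × Int)) (out : List (List (Int × List Int))) : Prop := out = generate_full_distributions_alt difficulty core_distributions
instance (difficulty : List Int) (core_distributions : List (Int × Int × Int × Int × Int × Int)) (out : List (List (Int × List Int))) : Decidable (Spec_generate_full_distributions difficulty core_distributions out) := by unfold Spec_generate_full_distributions; infer_instance

-- ===== CLAIM (what is proved, stated in full; the proofs are below) =====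
def Claim_equal_generate_full_distributions : Prop := ∀ (difficulty : List Int) (core_distributions : List (Int × Int × Int × Int × Int × Int)), Dom_generate_full_distributions difficulty core_distributions → Spec_generate_full_distributions difficulty core_distributions (generate_full_distributions difficulty core_distributions)

-- ===== LEMMAS AND PROOFS =====

-- every tuple produced by pvProduct3 n has length n
theorem pvProduct3_length {n : Nat} {t : List Int} (h : t ∈ pvProduct3 n) : t.length = n := by
  induction n generalizing t with
  | zero => simp [pvProduct3] at h; simp [h]
  | succ n ih =>
    simp only [pvProduct3, List.mem_flatMap, List.mem_map] at h
    obtain ⟨d, _, t', ht', rfl⟩ := h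
    simp [ih ht']

-- filtering an enumerate-fold: the guarded fold over enumerate equals the plain fold over
-- the filtered values
theorem foldl_enumerate_filter {α β : Type} (p : Int × α → Bool) (f : α → β → β)
    (xs : List (Int × α)) (L : β) :
    xs.foldl (fun acc ie => if p ie then f ie.2 acc else acc) L
      = ((xs.filter p).map (·.2)).foldl (fun acc e => f e acc) L := by
  induction xs generalizing L with
  | nil => rfl
  | cons x xs ih =>
    by_cases h : p x = true <;> simp [List.foldl_cons, h, ih]

-- the key invariant: A's breadth-first rebuild over the extras list E equals B's
-- per-assignment construction over pvProduct3 E.length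
theorem rebuild_eq_product (E : List Int) (d0 : List (Int × List Int)) :
    E.foldl (fun nds e =>
        ([0, 1, 2] : List Int).foldl (fun temp s => temp ++ nds.map (pvBucketAppendA s e)) [])
      [d0]
      = (pvProduct3 E.length).map (fun choice =>
          (choice.reverse.zip E).foldl (fun dist be => pvBucketAppendB be.1 be.2 dist) d0) := by
  induction E using List.reverseRecOn with
  | nil => simp [pvProduct3]
  | append_singleton E' e ih =>
    rw [List.foldl_append, ih]
    simp only [List.foldl_cons, List.foldl_nil, List.length_append, List.length_cons,
      List.length_nil, pvProduct3]
    rw [List.map_flatMap]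
    have hstep : ∀ d : Int,
        (pvProduct3 E'.length).map (fun t => ((d :: t).reverse.zip (E' ++ [e])).foldl
            (fun dist be => pvBucketAppendB be.1 be.2 dist) d0)
          = (pvProduct3 E'.length).map (fun t =>
              pvBucketAppendB d e ((t.reverse.zip E').foldl
                (fun dist be => pvBucketAppendB be.1 be.2 dist) d0)) := by
      intro d
      apply List.map_congr_left
      intro t ht
      have hlen : t.reverse.length = E'.length := by
        simp [pvProduct3_length ht]
      rw [List.reverse_cons, List.zip_append hlen, List.foldl_append]
      rfl
    simp only [List.map_map, Function.comp_def, hstep]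
    simp [List.flatMap_cons, List.append_assoc, pvBucketAppendA, pvBucketAppendB]

-- ===== VERDICT (by name: the statement is the Claim_ definition above) =====
theorem generate_full_distributions_spec : Claim_equal_generate_full_distributions := by
  intro difficulty core_distributions _hDom
  unfold Spec_generate_full_distributions generate_full_distributions generate_full_distributions_alt
  rw [PySem.List.foldl_append_eq_flatMap]
  simp only [List.nil_append]
  refine congrArg (fun g => List.flatMap g core_distributions) (funext fun cd => ?_)
  rw [foldl_enumerate_filter (p := fun ie => !(ie.1 == cd.1 || ie.1 == cd.2.1 || ie.1 == cd.2.2.1))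
      (f := fun e acc => ([0, 1, 2] : List Int).foldl
        (fun temp s => temp ++ acc.map (pvBucketAppendA s e)) []),
    rebuild_eq_product]
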